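-- pv_equiv track=rewrite | github.com/tgreaves/k-razy-shoot-out | sprites/test_horizontal_player_sprite.py | char_data_to_ascii
-- ===== SOURCE A (Python) =====
-- def char_data_to_ascii(char_data):
--     """Convert character data to ASCII art"""
--     lines = []
--     for byte_val in char_data:
--         line = ""
--         for bit in range(7, -1, -1):
--             line += "██" if byte_val & (1 << bit) else "  "
--         lines.append(line)
--     return lines
-- ===== SOURCE B (Python) =====
-- def char_data_to_ascii(char_data):
--     """Convert character data to ASCII art"""
--     lines = []
--     for byte_val in char_data:
--         bits = format(byte_val & 0xFF, '08b')
--         lines.append(bits.replace('1', '██').replace('0', '  '))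
--     return lines
-- ===== Notes on version B (the rewrite author's own statement) =====
-- stated objective: idiomatic
-- what changed: B replaces A's inner MSB-to-LSB bit loop (shift/AND per bit, string concatenation) with formatting the masked byte as an 8-digit binary string and substituting '1'->'██' / '0'->' ' via str.replace.
import Mathlib
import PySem

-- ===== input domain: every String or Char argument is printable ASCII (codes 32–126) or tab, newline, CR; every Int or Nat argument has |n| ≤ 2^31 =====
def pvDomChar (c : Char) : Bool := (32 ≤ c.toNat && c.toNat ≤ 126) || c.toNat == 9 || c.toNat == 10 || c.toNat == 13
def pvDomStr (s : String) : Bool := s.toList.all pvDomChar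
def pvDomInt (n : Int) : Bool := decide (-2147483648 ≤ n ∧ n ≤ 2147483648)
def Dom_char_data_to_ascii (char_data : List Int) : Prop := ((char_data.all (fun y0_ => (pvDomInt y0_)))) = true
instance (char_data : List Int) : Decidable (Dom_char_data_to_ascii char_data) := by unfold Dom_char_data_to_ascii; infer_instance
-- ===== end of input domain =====

-- B renders each byte's row by formatting (byte & 0xFF) as an 8-digit binary string and
-- substituting digits, instead of A's per-bit shift/AND loop; same output, same cost (idiomatic).

-- ===== PORT A =====
-- Python strings are built as List Char and packed with String.mk at the end (Lean's String.append
-- is opaque to the kernel); `byte_val & (1 << bit)` is PySem.Int.band / Lean's `<<<` (Python-exact,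
-- bit from range(7,-1,-1) is nonnegative); int truthiness is `≠ 0`.
def char_data_to_ascii (char_data : List Int) : List String :=
  char_data.foldl (fun lines byte_val =>
    lines ++ [String.mk ((PySem.List.pyRange 7 (-1) (-1)).foldl
      (fun line bit =>
        line ++ (if PySem.Int.band byte_val ((1:Int) <<< bit) ≠ 0 then ['█','█'] else [' ',' ']))
      [])]) []

-- ===== PORT B =====
-- format(m,'08b') for the nonnegative m = byte & 0xFF is PySem.Int.toBinChars zero-padded to
-- width 8; str.replace is PySem.Chars.replace.
def char_data_to_ascii_alt (char_data : List Int) : List String :=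
  char_data.foldl (fun lines byte_val =>
    lines ++ [String.mk (PySem.Chars.replace
      (PySem.Chars.replace
        (List.replicate (8 - (PySem.Int.toBinChars (PySem.Int.band byte_val 255)).length) '0'
          ++ PySem.Int.toBinChars (PySem.Int.band byte_val 255))
        ['1'] ['█','█'])
      ['0'] [' ',' '])]) []

-- ===== PRECONDITION & SPEC =====
def Spec_char_data_to_ascii (char_data : List Int) (out : List String) : Prop := out = char_data_to_ascii_alt char_data
instance (char_data : List Int) (out : List String) : Decidable (Spec_char_data_to_ascii char_data out) := by unfold Spec_char_data_to_ascii; infer_instance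

-- ===== CLAIM (what is proved, stated in full; the proofs are below) =====
def Claim_equal_char_data_to_ascii : Prop := ∀ (char_data : List Int), Dom_char_data_to_ascii char_data → Spec_char_data_to_ascii char_data (char_data_to_ascii char_data)

-- ===== LEMMAS AND PROOFS =====

-- A's row for one byte.
def pvRowA (b : Int) : String :=
  String.mk ((PySem.List.pyRange 7 (-1) (-1)).foldl
    (fun line bit =>
      line ++ (if PySem.Int.band b ((1:Int) <<< bit) ≠ 0 then ['█','█'] else [' ',' ']))
    [])

-- B's row as a function of the masked byte.
def pvRowG (m : Int) : String :=
  String.mk (PySem.Chars.replace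
    (PySem.Chars.replace
      (List.replicate (8 - (PySem.Int.toBinChars m).length) '0' ++ PySem.Int.toBinChars m)
      ['1'] ['█','█'])
    ['0'] [' ',' '])

theorem pvA_eq_map (xs : List Int) : char_data_to_ascii xs = xs.map pvRowA := by
  simpa [char_data_to_ascii, pvRowA] using
    PySem.List.foldl_append_singleton_eq_map (f := pvRowA) (l := xs) (acc := [])

theorem pvB_eq_map (xs : List Int) :
    char_data_to_ascii_alt xs = xs.map (fun b => pvRowG (PySem.Int.band b 255)) := by
  simpa [char_data_to_ascii_alt, pvRowG] using
    PySem.List.foldl_append_singleton_eq_map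
      (f := fun b => pvRowG (PySem.Int.band b 255)) (l := xs) (acc := [])

-- b & n for negative b, written over Nat (the two's-complement branch of PySem.Int.band).
theorem pvBand_neg_cast (b : Int) (hb : ¬ 0 ≤ b) (n : Nat) :
    PySem.Int.band b ((n : Nat) : Int) = ((n - (n &&& (-b - 1).toNat) : Nat) : Int) := by
  unfold PySem.Int.band
  simp only [if_neg hb, if_pos (show (0:Int) ≤ ((n : Nat) : Int) by positivity), Int.toNat_natCast]

theorem pvBand255_bounds (b : Int) : 0 ≤ PySem.Int.band b 255 ∧ PySem.Int.band b 255 < 256 := by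
  unfold PySem.Int.band
  have h255 : (0:Int) ≤ 255 := by norm_num
  by_cases hb : 0 ≤ b
  · simp only [if_pos hb, if_pos h255]
    have h : b.toNat &&& (255:Int).toNat ≤ (255:Int).toNat := Nat.and_le_right
    have h2 : (255:Int).toNat = 255 := by decide
    exact ⟨by positivity, by omega⟩
  · simp only [if_neg hb, if_pos h255]
    have h := Nat.sub_le ((255:Int).toNat) ((255:Int).toNat &&& (-b - 1).toNat)
    have h2 : (255:Int).toNat = 255 := by decide
    exact ⟨by positivity, by omega⟩

theorem pvAnd255 (k : Nat) (hk : k < 8) : 255 &&& 2 ^ k = 2 ^ k := by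
  interval_cases k <;> rfl

set_option maxRecDepth 4096 in
theorem pvSubAndTab : ∀ (l : Fin 256) (k : Fin 8),
    (255 - l.val) &&& 2 ^ k.val = 2 ^ k.val - (2 ^ k.val &&& l.val) := by decide

-- masking to the low byte does not change the low 8 bit tests
theorem pvBandPowN (b : Int) (k : Nat) (hk : k < 8) :
    PySem.Int.band b ((2 ^ k : Nat) : Int)
      = PySem.Int.band (PySem.Int.band b 255) ((2 ^ k : Nat) : Int) := by
  have hc : (0:Int) ≤ ((2 ^ k : Nat) : Int) := by positivity
  by_cases hb : 0 ≤ b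
  · have h1 : PySem.Int.band b 255 = ((b.toNat &&& 255 : Nat) : Int) := by
      have := PySem.Int.band_of_nonneg (a := b) (b := 255) hb (by norm_num)
      simpa using this
    rw [h1, PySem.Int.band_natCast, PySem.Int.band_of_nonneg hb hc]
    simp only [Int.toNat_natCast]
    congr 1
    conv_rhs => rw [Nat.and_assoc, pvAnd255 k hk]
  · have h1 : PySem.Int.band b 255 = ((255 - (255 &&& (-b - 1).toNat) : Nat) : Int) := by
      simpa using pvBand_neg_cast b hb 255
    rw [h1, PySem.Int.band_natCast, pvBand_neg_cast b hb (2 ^ k)]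
    congr 1
    set c : Nat := (-b - 1).toNat with hcdef
    have hl : 255 &&& c ≤ 255 := Nat.and_le_left
    have htab := pvSubAndTab ⟨255 &&& c, by omega⟩ ⟨k, hk⟩
    have h2c : (2 ^ k : Nat) &&& c = 2 ^ k &&& (255 &&& c) := by
      conv_lhs => rw [← pvAnd255 k hk, Nat.and_comm 255 (2 ^ k), Nat.and_assoc]
    rw [h2c, htab]

theorem pvRowA_band (b : Int) : pvRowA b = pvRowA (PySem.Int.band b 255) := by
  have hr : PySem.List.pyRange 7 (-1) (-1) = [7, 6, 5, 4, 3, 2, 1, 0] := by decide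
  have s7 : ((1:Int) <<< (7:Int)) = ((2 ^ 7 : Nat) : Int) := by decide
  have s6 : ((1:Int) <<< (6:Int)) = ((2 ^ 6 : Nat) : Int) := by decide
  have s5 : ((1:Int) <<< (5:Int)) = ((2 ^ 5 : Nat) : Int) := by decide
  have s4 : ((1:Int) <<< (4:Int)) = ((2 ^ 4 : Nat) : Int) := by decide
  have s3 : ((1:Int) <<< (3:Int)) = ((2 ^ 3 : Nat) : Int) := by decide
  have s2 : ((1:Int) <<< (2:Int)) = ((2 ^ 2 : Nat) : Int) := by decide
  have s1 : ((1:Int) <<< (1:Int)) = ((2 ^ 1 : Nat) : Int) := by decide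
  have s0 : ((1:Int) <<< (0:Int)) = ((2 ^ 0 : Nat) : Int) := by decide
  unfold pvRowA
  rw [hr]
  simp only [List.foldl]
  rw [s7, s6, s5, s4, s3, s2, s1, s0]
  rw [pvBandPowN b 7 (by omega), pvBandPowN b 6 (by omega), pvBandPowN b 5 (by omega),
      pvBandPowN b 4 (by omega), pvBandPowN b 3 (by omega), pvBandPowN b 2 (by omega),
      pvBandPowN b 1 (by omega), pvBandPowN b 0 (by omega)]

set_option maxRecDepth 16384 in
theorem pvFin_eq : ∀ m : Fin 256, pvRowA (m.val : Int) = pvRowG (m.val : Int) := by decide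

theorem pvRow_eq (b : Int) : pvRowA b = pvRowG (PySem.Int.band b 255) := by
  obtain ⟨h0, h1⟩ := pvBand255_bounds b
  have hn : PySem.Int.band b 255 = (((PySem.Int.band b 255).toNat : Nat) : Int) :=
    (Int.toNat_of_nonneg h0).symm
  have hlt : (PySem.Int.band b 255).toNat < 256 := by omega
  calc pvRowA b = pvRowA (PySem.Int.band b 255) := pvRowA_band b
    _ = pvRowA (((PySem.Int.band b 255).toNat : Nat) : Int) := by rw [← hn]
    _ = pvRowG (((PySem.Int.band b 255).toNat : Nat) : Int) := pvFin_eq ⟨_, hlt⟩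
    _ = pvRowG (PySem.Int.band b 255) := by rw [← hn]

-- ===== VERDICT (by name: the statement is the Claim_ definition above) =====
theorem char_data_to_ascii_spec : Claim_equal_char_data_to_ascii := by
  intro xs _
  unfold Spec_char_data_to_ascii
  rw [pvA_eq_map, pvB_eq_map]
  exact List.map_congr_left (fun b _ => pvRow_eq b)
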